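-- pv_equiv track=rewrite | github.com/MrBrantCode/unitest_baseline | mut_generate/mist_train_cf/cf_86917/solution.py | count_and_sum_primes
-- ===== SOURCE A (Python) =====
-- def is_prime(n):
--     if n <= 1:
--         return False
--     for i in range(2, int(n ** 0.5) + 1):
--         if n % i == 0:
--             return False
--     return True
--
-- def count_and_sum_primes(lst):
--     primes = set()
--     prime_sum = 0
--     for num in lst:
--         if isinstance(num, int) and num > 0 and num not in primes:
--             if is_prime(num):
--                 primes.add(num)
--                 prime_sum += num
--     return len(primes), prime_sum
-- ===== SOURCE B (Python) =====
-- def _is_prime_odd(n):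
--     # different primality test: handle 2/evens separately, then odd trial divisors only
--     if n < 2:
--         return False
--     if n % 2 == 0:
--         return n == 2
--     d = 3
--     while d * d <= n:
--         if n % d == 0:
--             return False
--         d += 2
--     return True
--
-- def count_and_sum_primes(lst):
--     # sort the positive ints, skip adjacent duplicates in one linear scan (no hash set)
--     xs = sorted(n for n in lst if isinstance(n, int) and n > 0)
--     count = 0
--     total = 0
--     prev = 0
--     for n in xs:
--         if n != prev and _is_prime_odd(n):
--             count += 1
--             total += n
--         prev = n
--     return count, total
-- ===== Notes on version B (the rewrite author's own statement) =====
-- stated objective: alternative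
-- what changed: B replaces A's hash-set-with-interleaved-trial-division loop by sort-then-scan dedup (adjacent-duplicate skipping over the sorted positives, no set at all) and a differently structured primality test (even case dispatched first, then trial division by odd divisors only via a d*d<=n while-loop instead of range(2,int(n**0.5)+1)).
import Mathlib
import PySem

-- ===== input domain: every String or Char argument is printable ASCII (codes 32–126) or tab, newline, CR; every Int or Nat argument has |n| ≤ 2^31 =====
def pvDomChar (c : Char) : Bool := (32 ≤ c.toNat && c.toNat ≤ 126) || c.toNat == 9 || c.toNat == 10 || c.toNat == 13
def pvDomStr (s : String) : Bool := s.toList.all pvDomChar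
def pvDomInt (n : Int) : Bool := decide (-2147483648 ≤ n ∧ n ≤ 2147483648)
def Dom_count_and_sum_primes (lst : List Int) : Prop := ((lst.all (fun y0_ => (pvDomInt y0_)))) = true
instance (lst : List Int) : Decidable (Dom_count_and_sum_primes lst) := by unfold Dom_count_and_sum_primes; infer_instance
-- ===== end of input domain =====

-- B replaces A's hash-set loop by sort-then-adjacent-dedup and an odd-divisors-only trial division; equal return value proved.


-- ===== PORT A =====
-- the 'for i in range(...)' loop of is_prime
def trialLoop (n : Int) : List Int → Bool
  | [] => true
  | i :: rest => if PySem.Int.mod n i = 0 then false else trialLoop n rest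

-- int(n ** 0.5) = Nat.sqrt n.toNat exactly for 2 ≤ n ≤ 2^31 (double sqrt is correctly
-- rounded there and truncation gives the integer square root; checked against CPython)
def is_prime (n : Int) : Bool :=
  if n ≤ 1 then false
  else trialLoop n (PySem.List.pyRange 2 ((Nat.sqrt n.toNat : Int) + 1) 1)

def count_and_sum_primes (lst : List Int) : Int × Int :=
  let st := lst.foldl (fun (st : PySem.Set Int × Int) num =>
    if decide (0 < num) && !(PySem.Set.contains st.1 num) then
      if is_prime num then (PySem.Set.add st.1 num, st.2 + num) else st
    else st) (PySem.Set.empty, 0)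
  ((PySem.Set.len st.1 : Int), st.2)

-- ===== PORT B =====
-- the 'while d * d <= n' loop of _is_prime_odd; called only with n odd ≥ 3 and d odd ≥ 3,
-- where Python's % on positives is Nat's %
def oddTrial (n : Nat) (d : Nat) : Bool :=
  if d * d ≤ n then
    (if n % d = 0 then false else oddTrial n (d + 2))
  else true
termination_by n + 1 - d
decreasing_by
  have hd : d = 0 ∨ d ≤ d * d := by
    rcases Nat.eq_zero_or_pos d with h0 | h1
    · exact Or.inl h0
    · exact Or.inr (Nat.le_mul_of_pos_left d h1)
  omega

def is_prime_odd (n : Int) : Bool :=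
  if n < 2 then false
  else if PySem.Int.mod n 2 = 0 then decide (n = 2)
  else oddTrial n.toNat 3   -- here 3 ≤ n so n.toNat is exact

-- B's loop body: (count, total, prev)
def stepB (st : Int × Int × Int) (n : Int) : Int × Int × Int :=
  if n ≠ st.2.2 ∧ is_prime_odd n = true then (st.1 + 1, st.2.1 + n, n)
  else (st.1, st.2.1, n)

def count_and_sum_primes_alt (lst : List Int) : Int × Int :=
  let xs := PySem.List.sorted (lst.filter (fun n => decide (0 < n))) (fun x => x) false
  let st := xs.foldl stepB (0, 0, 0)
  (st.1, st.2.1)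

-- ===== PRECONDITION & SPEC =====
def Spec_count_and_sum_primes (lst : List Int) (out : Int × Int) : Prop := out = count_and_sum_primes_alt lst
instance (lst : List Int) (out : Int × Int) : Decidable (Spec_count_and_sum_primes lst out) := by unfold Spec_count_and_sum_primes; infer_instance

-- ===== CLAIM (what is proved, stated in full; the proofs are below) =====
def Claim_equal_count_and_sum_primes : Prop := ∀ (lst : List Int), Dom_count_and_sum_primes lst → Spec_count_and_sum_primes lst (count_and_sum_primes lst)

-- ===== LEMMAS AND PROOFS =====

-- ---------- the two primality tests agree ----------

theorem trialLoop_eq_all (n : Int) (l : List Int) :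
    trialLoop n l = l.all (fun i => !(decide (PySem.Int.mod n i = 0))) := by
  induction l with
  | nil => rfl
  | cons i rest ih =>
    by_cases h : PySem.Int.mod n i = 0 <;> simp [trialLoop, h, ih]

-- A's test decides primality of n.toNat for n ≥ 2
theorem is_prime_iff (n : Int) (h2 : 2 ≤ n) :
    is_prime n = true ↔ Nat.Prime n.toNat := by
  have hn : ((n.toNat : Nat) : Int) = n := Int.toNat_of_nonneg (by omega)
  rw [is_prime, if_neg (by omega), trialLoop_eq_all, List.all_eq_true]
  constructor
  · intro hall
    rw [Nat.prime_def_le_sqrt]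
    refine ⟨by omega, ?_⟩
    intro m h2m hm hdvd
    have hmem : (m : Int) ∈ PySem.List.pyRange 2 ((Nat.sqrt n.toNat : Int) + 1) 1 :=
      PySem.List.mem_pyRange_one.mpr ⟨by exact_mod_cast h2m, by exact_mod_cast Nat.lt_succ_of_le hm⟩
    have := hall (m : Int) hmem
    rw [Bool.not_eq_eq_eq_not, Bool.not_true, decide_eq_false_iff_not,
      PySem.Int.mod_eq_zero_iff_dvd] at this
    exact this (by rw [← hn]; exact_mod_cast hdvd)
  · intro hp i hi
    rw [PySem.List.mem_pyRange_one] at hi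
    obtain ⟨h2i, hlt⟩ := hi
    rw [Bool.not_eq_eq_eq_not, Bool.not_true, decide_eq_false_iff_not,
      PySem.Int.mod_eq_zero_iff_dvd]
    intro hdvd
    have hdn : i.toNat ∣ n.toNat := by
      rw [← Int.natCast_dvd_natCast]
      rw [hn, Int.toNat_of_nonneg (by omega : (0:Int) ≤ i)]
      exact hdvd
    exact (Nat.prime_def_le_sqrt.mp hp).2 i.toNat (by omega) (by omega) hdn

-- characterization of B's while loop (d odd path; 1 ≤ d keeps n % d meaningful)
theorem oddTrial_iff (m : Nat) :
    ∀ k d, 1 ≤ d → m + 1 - d ≤ k →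
      (oddTrial m d = true ↔ ∀ e, d ≤ e → e % 2 = d % 2 → e * e ≤ m → ¬ e ∣ m) := by
  intro k
  induction k with
  | zero =>
    intro d hd hk
    have hdd : d ≤ d * d := Nat.le_mul_of_pos_left d (by omega)
    rw [oddTrial, if_neg (by omega)]
    simp only [true_iff]
    intro e hde _ hsq _
    have : d * d ≤ e * e := Nat.mul_le_mul hde hde
    omega
  | succ k ih =>
    intro d hd hk
    rw [oddTrial]
    by_cases hdd : d * d ≤ m
    · rw [if_pos hdd]
      have hdm : d ≤ m := le_trans (Nat.le_mul_of_pos_left d (by omega)) hdd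
      by_cases hmod : m % d = 0
      · rw [if_pos hmod]
        constructor
        · intro h; simp at h
        · intro h; exact absurd (Nat.dvd_of_mod_eq_zero hmod) (h d le_rfl rfl hdd)
      · rw [if_neg hmod, ih (d + 2) (by omega) (by omega)]
        constructor
        · intro h e hde hpar hsq hdvd
          rcases (by omega : e = d ∨ d + 2 ≤ e) with rfl | h2
          · exact absurd (Nat.dvd_iff_mod_eq_zero.mp hdvd) hmod
          · exact h e h2 (by omega) hsq hdvd
        · intro h e hde hpar hsq hdvd
          exact h e (by omega) (by omega) hsq hdvd
    · rw [if_neg hdd]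
      simp only [true_iff]
      intro e hde _ hsq _
      have : d * d ≤ e * e := Nat.mul_le_mul hde hde
      omega

-- B's test decides primality of n.toNat for n ≥ 2
theorem is_prime_odd_iff (n : Int) (h2 : 2 ≤ n) :
    is_prime_odd n = true ↔ Nat.Prime n.toNat := by
  have hn : ((n.toNat : Nat) : Int) = n := Int.toNat_of_nonneg (by omega)
  have hm2 : 2 ≤ n.toNat := by omega
  rw [is_prime_odd, if_neg (by omega)]
  by_cases heven : PySem.Int.mod n 2 = 0
  · rw [if_pos heven]
    rw [PySem.Int.mod_eq_zero_iff_dvd] at heven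
    have h2m : 2 ∣ n.toNat := by
      rw [← Int.natCast_dvd_natCast]; push_cast [hn]; exact heven
    simp only [decide_eq_true_eq]
    constructor
    · rintro rfl; decide
    · intro hp
      have := (hp.even_iff).mp (even_iff_two_dvd.mpr h2m)
      omega
  · rw [if_neg heven]
    rw [PySem.Int.mod_eq_zero_iff_dvd] at heven
    have hmodd : ¬ 2 ∣ n.toNat := by
      intro h; exact heven (by rw [← hn]; exact_mod_cast h)
    rw [oddTrial_iff n.toNat (n.toNat + 1) 3 (by omega) (by omega)]
    constructor
    · intro h
      by_contra hnp
      set p := n.toNat.minFac with hp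
      have hpp : Nat.Prime p := Nat.minFac_prime (by omega)
      have hpd : p ∣ n.toNat := Nat.minFac_dvd _
      have hp2 : p ≠ 2 := fun hq => hmodd (hq ▸ hpd)
      have hpodd : p % 2 = 1 := (hpp.eq_two_or_odd).resolve_left hp2
      have hp3 : 3 ≤ p := by have := hpp.two_le; omega
      have hsq : p * p ≤ n.toNat := by
        have := Nat.minFac_sq_le_self (by omega : 0 < n.toNat) hnp
        rw [pow_two] at this; exact this
      exact h p hp3 hpodd hsq hpd
    · intro hp e h3 _ hsq hdvd
      rcases (hp.eq_one_or_self_of_dvd e hdvd) with rfl | he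
      · omega
      · rw [← he] at hsq
        have : 2 * e ≤ e * e := by
          rw [mul_comm]; exact Nat.mul_le_mul_left e (by omega)
        omega

theorem is_prime_eq (n : Int) : is_prime n = is_prime_odd n := by
  by_cases h : 2 ≤ n
  · rw [Bool.eq_iff_iff, is_prime_iff n h, is_prime_odd_iff n h]
  · have h1 : n ≤ 1 := by omega
    simp [is_prime, is_prime_odd, h1, show n < 2 by omega]

-- ---------- A's loop (hash-set accumulation) ----------

def stepA (st : PySem.Set Int × Int) (num : Int) : PySem.Set Int × Int :=
  if decide (0 < num) && !(PySem.Set.contains st.1 num) then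
    if is_prime num then (PySem.Set.add st.1 num, st.2 + num) else st
  else st

theorem stepA_of_nonpos (st : PySem.Set Int × Int) (num : Int) (h : ¬ 0 < num) :
    stepA st num = st := by simp [stepA, h]

theorem stepA_of_notprime (st : PySem.Set Int × Int) (num : Int) (h : is_prime num = false) :
    stepA st num = st := by simp [stepA, h]

theorem stepA_of_mem (st : PySem.Set Int × Int) (num : Int) (h : num ∈ st.1) :
    stepA st num = st := by simp [stepA, PySem.Set.contains, h]

theorem stepA_of_new (st : PySem.Set Int × Int) (num : Int) (h1 : 0 < num)
    (h2 : num ∉ st.1) (h3 : is_prime num = true) :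
    stepA st num = (PySem.Set.add st.1 num, st.2 + num) := by
  simp [stepA, PySem.Set.contains, h1, h2, h3]

theorem filter_add (s : PySem.Set Int) (x : Int) (p : Int → Bool) :
    (PySem.Set.add s x).filter p =
      if x ∈ s then s.filter p else s.filter p ++ (if p x then [x] else []) := by
  by_cases h : x ∈ s
  · simp [PySem.Set.add, PySem.Set.contains, h]
  · cases hpx : p x <;>
      simp [PySem.Set.add, PySem.Set.contains, h, List.filter_append, hpx]

-- main invariant of A's loop
theorem loop_inv (lst : List Int) :
    ∀ (seen : PySem.Set Int) (acc : Int), (∀ x ∈ seen, 0 < x) →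
    lst.foldl stepA (seen.filter is_prime, acc) =
      (((PySem.Set.update seen (lst.filter (fun n => decide (0 < n)))).filter is_prime),
       acc + ((PySem.Set.update seen (lst.filter (fun n => decide (0 < n)))).filter is_prime).sum
           - (seen.filter is_prime).sum) := by
  induction lst with
  | nil => intro seen acc _; simp [PySem.Set.update]
  | cons n t ih =>
    intro seen acc hpos
    by_cases hn : 0 < n
    · have hforall : ∀ x ∈ PySem.Set.add seen n, 0 < x := by
        intro x hx
        by_cases h : n ∈ seen
        · exact hpos x (by simpa [PySem.Set.add, PySem.Set.contains, h] using hx)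
        · rcases (by simpa [PySem.Set.add, PySem.Set.contains, h] using hx :
            x ∈ seen ∨ x = n) with h' | h'
          · exact hpos x h'
          · omega
      have hupd : PySem.Set.update seen ((n :: t).filter (fun n => decide (0 < n))) =
          PySem.Set.update (PySem.Set.add seen n) (t.filter (fun n => decide (0 < n))) := by
        simp [PySem.Set.update, hn]
      by_cases hp : is_prime n = true
      · by_cases hmem : n ∈ seen
        · have hadd : PySem.Set.add seen n = seen := by
            simp [PySem.Set.add, PySem.Set.contains, hmem]
          rw [List.foldl_cons,
            stepA_of_mem _ _ (List.mem_filter.2 ⟨hmem, hp⟩),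
            ih seen acc hpos, hupd, hadd]
        · have hfa : (PySem.Set.add seen n).filter is_prime =
              seen.filter is_prime ++ [n] := by
            rw [filter_add]; simp [hmem, hp]
          have hnm : n ∉ seen.filter is_prime := fun h => hmem (List.mem_filter.1 h).1
          have hAadd : PySem.Set.add (seen.filter is_prime) n =
              (PySem.Set.add seen n).filter is_prime := by
            rw [hfa, PySem.Set.add]
            simp [PySem.Set.contains, hnm]
          rw [List.foldl_cons, stepA_of_new _ _ hn hnm hp]
          simp only at hAadd ⊢
          rw [hAadd, ih (PySem.Set.add seen n) (acc + n) hforall, hupd, hfa]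
          rw [Prod.mk.injEq]
          refine ⟨rfl, ?_⟩
          rw [List.sum_append]; simp; ring
      · have hfa : (PySem.Set.add seen n).filter is_prime = seen.filter is_prime := by
          rw [filter_add]
          by_cases hmem : n ∈ seen <;> simp [hmem, Bool.eq_false_iff.1 (by simpa using hp)]
        rw [List.foldl_cons, stepA_of_notprime _ _ (by simpa using hp),
          ← hfa, ih (PySem.Set.add seen n) acc hforall, hupd, hfa]
    · rw [List.foldl_cons, stepA_of_nonpos _ _ hn, ih seen acc hpos]
      simp [PySem.Set.update, hn]

-- ---------- B's loop (adjacent-dedup scan) ----------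

-- the values B's scan keeps: those differing from the previous element
def selected (p : Int) : List Int → List Int
  | [] => []
  | n :: t => if n ≠ p then n :: selected n t else selected n t

theorem foldB (ys : List Int) :
    ∀ c s p, ys.foldl stepB (c, s, p) =
      (c + (((selected p ys).filter is_prime_odd).length : Int),
       s + ((selected p ys).filter is_prime_odd).sum,
       ys.getLastD p) := by
  induction ys with
  | nil => intro c s p; simp [selected]
  | cons n t ih =>
    intro c s p
    by_cases hp : n = p
    · subst hp
      rw [List.foldl_cons, show stepB (c, s, n) n = (c, s, n) by simp [stepB],
        ih c s n, List.getLastD_cons]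
      simp [selected]
    · by_cases hq : is_prime_odd n = true
      · rw [List.foldl_cons, show stepB (c, s, p) n = (c + 1, s + n, n) by simp [stepB, hp, hq],
          ih (c + 1) (s + n) n, List.getLastD_cons]
        simp [selected, hp, hq]
        constructor
        · ring
        · ring
      · rw [List.foldl_cons, show stepB (c, s, p) n = (c, s, n) by simp [stepB, hq],
          ih c s n, List.getLastD_cons]
        simp [selected, hp, hq]

-- on a sorted list with all elements above p, 'selected p' is exactly the distinct values
theorem selected_spec (ys : List Int) (h : ys.Pairwise (· ≤ ·)) :
    ∀ p, (∀ y ∈ ys, p ≤ y) →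
      (selected p ys).Nodup ∧ (∀ a, a ∈ selected p ys ↔ a ∈ ys ∧ a ≠ p) := by
  induction ys with
  | nil => intro p _; simp [selected]
  | cons n t ih =>
    rw [List.pairwise_cons] at h
    obtain ⟨hle, hpt⟩ := h
    intro p hp
    have hpn : p ≤ n := hp n (List.mem_cons_self)
    by_cases hnp : n = p
    · subst hnp
      rw [show selected n (n :: t) = selected n t by simp [selected]]
      obtain ⟨hnd, hmem⟩ := ih hpt n hle
      refine ⟨hnd, fun a => ?_⟩
      rw [hmem a, List.mem_cons]
      constructor
      · rintro ⟨ha, hne⟩; exact ⟨Or.inr ha, hne⟩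
      · rintro ⟨h1, hne⟩
        rcases h1 with rfl | ha
        · exact absurd rfl hne
        · exact ⟨ha, hne⟩
    · have hplt : p < n := lt_of_le_of_ne hpn (fun h => hnp h.symm)
      rw [show selected p (n :: t) = n :: selected n t by simp [selected, hnp]]
      obtain ⟨hnd, hmem⟩ := ih hpt n hle
      constructor
      · rw [List.nodup_cons]
        exact ⟨fun h => ((hmem n).mp h).2 rfl, hnd⟩
      · intro a
        rw [List.mem_cons, hmem a, List.mem_cons]
        constructor
        · rintro (rfl | ⟨ha, hne⟩)
          · exact ⟨Or.inl rfl, fun h => hnp h⟩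
          · exact ⟨Or.inr ha, fun h => absurd (h ▸ hle a ha) (not_le.mpr (h ▸ hplt))⟩
        · rintro ⟨h1, hne⟩
          rcases h1 with rfl | ha
          · exact Or.inl rfl
          · by_cases han : a = n
            · exact Or.inl han
            · exact Or.inr ⟨ha, han⟩

-- ===== VERDICT (by name: the statement is the Claim_ definition above) =====
theorem count_and_sum_primes_spec : Claim_equal_count_and_sum_primes := by
  intro lst _
  unfold Spec_count_and_sum_primes
  -- A's loop result, via loop_inv
  have h0 := loop_inv lst PySem.Set.empty 0
    (by intro x hx; simp [PySem.Set.empty] at hx)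
  have hen : (PySem.Set.empty : PySem.Set Int).filter is_prime = PySem.Set.empty := rfl
  rw [hen] at h0
  have hofl : PySem.Set.update PySem.Set.empty (lst.filter (fun n => decide (0 < n))) =
      PySem.Set.ofList (lst.filter (fun n => decide (0 < n))) := by
    simp [PySem.Set.update, PySem.Set.ofList_eq_foldl, PySem.Set.empty]
  rw [hofl] at h0
  have hA : count_and_sum_primes lst =
      ((((PySem.Set.ofList (lst.filter (fun n => decide (0 < n)))).filter is_prime).length : Int),
       ((PySem.Set.ofList (lst.filter (fun n => decide (0 < n)))).filter is_prime).sum) := by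
    show ((PySem.Set.len ((lst.foldl stepA (PySem.Set.empty, 0)).1) : Int),
          (lst.foldl stepA (PySem.Set.empty, 0)).2) = _
    rw [h0]
    simp [PySem.Set.len, PySem.Set.empty]
  -- B's loop result, via foldB
  have hB : count_and_sum_primes_alt lst =
      ((((selected 0 (PySem.List.sorted (lst.filter (fun n => decide (0 < n))) (fun x => x) false)).filter is_prime_odd).length : Int),
       ((selected 0 (PySem.List.sorted (lst.filter (fun n => decide (0 < n))) (fun x => x) false)).filter is_prime_odd).sum) := by
    show ((((PySem.List.sorted (lst.filter (fun n => decide (0 < n))) (fun x => x) false).foldl stepB (0, 0, 0)).1),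
          (((PySem.List.sorted (lst.filter (fun n => decide (0 < n))) (fun x => x) false).foldl stepB (0, 0, 0)).2.1)) = _
    rw [foldB _ 0 0 0]
    simp
  -- the scanned distinct values are a permutation of A's set
  have hpw : (PySem.List.sorted (lst.filter (fun n => decide (0 < n))) (fun x => x) false).Pairwise (· ≤ ·) :=
    PySem.List.sorted_pairwise _ _
  have hpos : ∀ y ∈ PySem.List.sorted (lst.filter (fun n => decide (0 < n))) (fun x => x) false, (0:Int) ≤ y := by
    intro y hy
    have hyP : y ∈ lst.filter (fun n => decide (0 < n)) := (PySem.List.mem_sorted _ _ _ _).mp hy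
    have := (List.mem_filter.mp hyP).2
    simp at this; omega
  obtain ⟨hnd, hmem⟩ := selected_spec _ hpw 0 hpos
  have hmem' : ∀ a, a ∈ selected 0 (PySem.List.sorted (lst.filter (fun n => decide (0 < n))) (fun x => x) false) ↔
      a ∈ PySem.Set.ofList (lst.filter (fun n => decide (0 < n))) := by
    intro a
    rw [hmem a, PySem.Set.mem_ofList _ a]
    constructor
    · rintro ⟨ha, _⟩; exact (PySem.List.mem_sorted _ _ _ _).mp ha
    · intro ha
      have hp := (List.mem_filter.mp ha).2
      simp at hp
      exact ⟨(PySem.List.mem_sorted _ _ _ _).mpr ha, by omega⟩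
  have hperm : (selected 0 (PySem.List.sorted (lst.filter (fun n => decide (0 < n))) (fun x => x) false)).Perm
      (PySem.Set.ofList (lst.filter (fun n => decide (0 < n)))) :=
    (List.perm_ext_iff_of_nodup hnd (PySem.Set.nodup_ofList _)).mpr hmem'
  have hfeq : (PySem.Set.ofList (lst.filter (fun n => decide (0 < n)))).filter is_prime =
      (PySem.Set.ofList (lst.filter (fun n => decide (0 < n)))).filter is_prime_odd :=
    List.filter_congr (fun x _ => is_prime_eq x)
  have hpermf := hperm.filter is_prime_odd
  rw [hA, hB, hfeq, hpermf.length_eq, hpermf.sum_eq]
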